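-- pv_equiv track=rewrite | github.com/Luiz0770/Sprint4--Dynimac-Programming | smartstock.py | versao_recursiva
-- ===== SOURCE A (Python) =====
-- def calcular_custo(estoque, ideal):
--     # Define os custos extras (valores fictícios para o exemplo)
--     custo_falta = 8
--     custo_excesso = 2
--
--     if estoque < 0:
--         return (-estoque) * custo_falta
--     elif estoque > ideal:
--         return (estoque - ideal) * custo_excesso
--     return 0  # estoque ideal
--
-- def decisoes(consumo_ideal):
--     consumir_menos = consumo_ideal - 1
--     if consumir_menos < 0:
--         consumir_menos = 0
--     consumir_ideal = consumo_ideal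
--     consumir_mais = consumo_ideal + 1
--     lista_decisoes = [consumir_menos, consumir_ideal, consumir_mais]
--     return lista_decisoes
--
-- def versao_recursiva(dia, estoque, dias_totais, consumo_ideal, ideal):
--     if dia == dias_totais:
--         return 0
--     # float('inf') representa um valor maior que qualquer outro
--     melhor = float('inf')
--     for decisao in decisoes(consumo_ideal):
--         prox_estoque = estoque - decisao
--         custo = calcular_custo(prox_estoque, ideal) + versao_recursiva(dia + 1, prox_estoque, dias_totais, consumo_ideal, ideal)
--         if custo < melhor:
--             melhor = custo
--     return melhor
-- ===== SOURCE B (Python) =====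
-- def versao_recursiva(dia, estoque, dias_totais, consumo_ideal, ideal):
--     n = dias_totais - dia
--     if n <= 0:
--         return 0
--     decs = [max(consumo_ideal - 1, 0), consumo_ideal, consumo_ideal + 1]
--
--     def custo(e):
--         if e < 0:
--             return -e * 8
--         if e > ideal:
--             return (e - ideal) * 2
--         return 0
--
--     # forward pass: levels[k] = stock values reachable after k days
--     levels = [{estoque}]
--     for _ in range(n):
--         levels.append({s - d for s in levels[-1] for d in decs})
--     # backward pass: f maps each state of the current level to its minimal remaining cost
--     f = {s: 0 for s in levels[-1]}
--     for states in reversed(levels[:-1]):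
--         f = {s: min(custo(s - d) + f[s - d] for d in decs) for s in states}
--     return f[estoque]
-- ===== Notes on version B (the rewrite author's own statement) =====
-- stated objective: alternative
-- what changed: Replaced the exponential 3-way recursion over days with a bottom-up dynamic program: reachable stock states are propagated forward level by level and the minimal cost per state is tabulated backward in a dict per level, so each (days-left, stock) state is solved once.
-- crash fix: For dia > dias_totais A recurses past dias_totais forever and raises RecursionError; B returns 0 (no days remain). — e.g. on versao_recursiva(1, 0, 0, 1, 1): A raises RecursionError, B returns 0
import Mathlib
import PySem

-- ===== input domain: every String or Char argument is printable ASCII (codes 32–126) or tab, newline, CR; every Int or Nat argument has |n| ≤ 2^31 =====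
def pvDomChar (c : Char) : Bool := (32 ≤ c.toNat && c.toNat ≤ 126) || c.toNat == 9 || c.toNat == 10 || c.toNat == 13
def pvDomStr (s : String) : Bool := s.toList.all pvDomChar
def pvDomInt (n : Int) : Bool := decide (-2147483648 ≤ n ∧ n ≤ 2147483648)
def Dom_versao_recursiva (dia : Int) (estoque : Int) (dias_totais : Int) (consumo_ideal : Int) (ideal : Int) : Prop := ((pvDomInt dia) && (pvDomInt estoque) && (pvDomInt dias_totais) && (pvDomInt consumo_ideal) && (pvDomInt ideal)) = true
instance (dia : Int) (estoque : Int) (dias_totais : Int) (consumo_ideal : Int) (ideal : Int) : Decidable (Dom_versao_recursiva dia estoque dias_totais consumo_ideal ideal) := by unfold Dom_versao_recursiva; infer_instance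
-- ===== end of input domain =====

-- B replaces A's three-way day recursion with a bottom-up DP over the levels of reachable
-- stock states; equivalence of the return value is proved on dia ≤ dias_totais.

-- ===== PORT A =====
def calcular_custo (estoque : Int) (ideal : Int) : Int :=
  if estoque < 0 then (-estoque) * 8
  else if estoque > ideal then (estoque - ideal) * 2
  else 0

def decisoes (consumo_ideal : Int) : List Int :=
  let consumir_menos := if consumo_ideal - 1 < 0 then 0 else consumo_ideal - 1
  [consumir_menos, consumo_ideal, consumo_ideal + 1]

-- A's recursion on `dia` terminates only when dia ≤ dias_totais; `fuel = (dias_totais - dia).toNat`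
-- makes that structural (fuel 0 with dia ≠ dias_totais is unreachable under Pre_).
-- `melhor = float('inf')` then `if custo < melhor` is the Option-valued running minimum.
def versao_recursiva_go (fuel : Nat) (dia : Int) (estoque : Int) (dias_totais : Int) (consumo_ideal : Int) (ideal : Int) : Int :=
  match fuel with
  | 0 => 0
  | fuel + 1 =>
    if dia = dias_totais then 0
    else
      let melhor := (decisoes consumo_ideal).foldl
        (fun (melhor : Option Int) (decisao : Int) =>
          let prox_estoque := estoque - decisao
          let custo := calcular_custo prox_estoque ideal +
            versao_recursiva_go fuel (dia + 1) prox_estoque dias_totais consumo_ideal ideal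
          match melhor with
          | none => some custo
          | some m => if custo < m then some custo else some m) none
      melhor.getD 0  -- loop is over a 3-element list, so melhor is never none

def versao_recursiva (dia : Int) (estoque : Int) (dias_totais : Int) (consumo_ideal : Int) (ideal : Int) : Int :=
  versao_recursiva_go (dias_totais - dia).toNat dia estoque dias_totais consumo_ideal ideal

-- ===== PORT B =====
def altCusto (ideal : Int) (e : Int) : Int :=
  if e < 0 then -e * 8
  else if e > ideal then (e - ideal) * 2
  else 0

-- Source B's forward pass: the list [levels[0], …, levels[n]] of reachable state sets
-- (Python appends step({levels[-1]}) n times; here the same list is built head-first).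
def buildLevels (decs : List Int) (lvl : PySem.Set Int) : Nat → List (PySem.Set Int)
  | 0 => [lvl]
  | k + 1 => lvl :: buildLevels decs (PySem.Set.ofList (lvl.flatMap (fun s => decs.map (fun d => s - d)))) k

-- the body of Source B's backward loop: one dict comprehension over a level's (distinct) states.
-- `f[s - d]` is ported as getD with default 0: the key is always present, since the next
-- level contains s - d for every s in this level and d in decs (proved below), so Python
-- never raises KeyError here. `min(...)` over the nonempty generator is min?.getD 0.
def altStep (ideal : Int) (decs : List Int) (f : PySem.Dict Int Int) (states : PySem.Set Int) : PySem.Dict Int Int :=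
  PySem.Dict.mk (states.map (fun s =>
    (s, (PySem.List.min? (decs.map (fun d => altCusto ideal (s - d) + f.getD (s - d) 0))
          (fun x => x)).getD 0)))

def versao_recursiva_alt (dia : Int) (estoque : Int) (dias_totais : Int) (consumo_ideal : Int) (ideal : Int) : Int :=
  let n := dias_totais - dia
  if n ≤ 0 then 0
  else
    let decs := [max (consumo_ideal - 1) 0, consumo_ideal, consumo_ideal + 1]
    let levels := buildLevels decs (PySem.Set.ofList [estoque]) n.toNat
    -- f = {s: 0 for s in levels[-1]}; levels is never empty, so the -1 index never raises
    let f0 := PySem.Dict.mk ((PySem.List.pyGetD levels (-1) []).map (fun s => (s, (0 : Int))))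
    -- for states in reversed(levels[:-1]): f = {…}
    let f := (levels.dropLast.reverse).foldl (altStep ideal decs) f0
    f.getD estoque 0

-- ===== PRECONDITION & SPEC =====
-- For dia > dias_totais A's recursion never reaches the base case (Python RecursionError).
def Pre_versao_recursiva (dia : Int) (estoque : Int) (dias_totais : Int) (consumo_ideal : Int) (ideal : Int) : Prop :=
  dia ≤ dias_totais
instance (dia : Int) (estoque : Int) (dias_totais : Int) (consumo_ideal : Int) (ideal : Int) : Decidable (Pre_versao_recursiva dia estoque dias_totais consumo_ideal ideal) := by unfold Pre_versao_recursiva; infer_instance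

def pvWitness_versao_recursiva : Int × Int × Int × Int × Int := (0, 5, 3, 2, 4)

-- For dia > dias_totais A recurses past dias_totais forever and raises RecursionError; B returns 0 (no days remain).
def Raises_versao_recursiva (dia : Int) (estoque : Int) (dias_totais : Int) (consumo_ideal : Int) (ideal : Int) : Prop :=
  dias_totais < dia
instance (dia : Int) (estoque : Int) (dias_totais : Int) (consumo_ideal : Int) (ideal : Int) : Decidable (Raises_versao_recursiva dia estoque dias_totais consumo_ideal ideal) := by unfold Raises_versao_recursiva; infer_instance
def pvRaiseWitness_versao_recursiva : Int × Int × Int × Int × Int := (1, 0, 0, 1, 1)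
def pvRaiseWitnessOut_versao_recursiva : Int := 0

def Spec_versao_recursiva (dia : Int) (estoque : Int) (dias_totais : Int) (consumo_ideal : Int) (ideal : Int) (out : Int) : Prop := out = versao_recursiva_alt dia estoque dias_totais consumo_ideal ideal
instance (dia : Int) (estoque : Int) (dias_totais : Int) (consumo_ideal : Int) (ideal : Int) (out : Int) : Decidable (Spec_versao_recursiva dia estoque dias_totais consumo_ideal ideal out) := by unfold Spec_versao_recursiva; infer_instance

-- ===== CLAIM (what is proved, stated in full; the proofs are below) =====
def Claim_equal_versao_recursiva : Prop := ∀ (dia : Int) (estoque : Int) (dias_totais : Int) (consumo_ideal : Int) (ideal : Int), Dom_versao_recursiva dia estoque dias_totais consumo_ideal ideal → Pre_versao_recursiva dia estoque dias_totais consumo_ideal ideal → Spec_versao_recursiva dia estoque dias_totais consumo_ideal ideal (versao_recursiva dia estoque dias_totais consumo_ideal ideal)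

def Claim_raises_versao_recursiva : Prop := (∀ (dia : Int) (estoque : Int) (dias_totais : Int) (consumo_ideal : Int) (ideal : Int), Dom_versao_recursiva dia estoque dias_totais consumo_ideal ideal → Raises_versao_recursiva dia estoque dias_totais consumo_ideal ideal → ¬ Pre_versao_recursiva dia estoque dias_totais consumo_ideal ideal) ∧ (Dom_versao_recursiva (pvRaiseWitness_versao_recursiva.1) (pvRaiseWitness_versao_recursiva.2.1) (pvRaiseWitness_versao_recursiva.2.2.1) (pvRaiseWitness_versao_recursiva.2.2.2.1) (pvRaiseWitness_versao_recursiva.2.2.2.2) ∧ Raises_versao_recursiva (pvRaiseWitness_versao_recursiva.1) (pvRaiseWitness_versao_recursiva.2.1) (pvRaiseWitness_versao_recursiva.2.2.1) (pvRaiseWitness_versao_recursiva.2.2.2.1) (pvRaiseWitness_versao_recursiva.2.2.2.2) ∧ versao_recursiva_alt (pvRaiseWitness_versao_recursiva.1) (pvRaiseWitness_versao_recursiva.2.1) (pvRaiseWitness_versao_recursiva.2.2.1) (pvRaiseWitness_versao_recursiva.2.2.2.1) (pvRaiseWitness_versao_recursiva.2.2.2.2) = pvRaiseWitnessOut_ve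rsao_recursiva)

-- ===== LEMMAS AND PROOFS =====

-- The mathematical value both programs compute: minimal cost with k days left and stock s.
def bestCost (consumo_ideal : Int) (ideal : Int) : Nat → Int → Int
  | 0, _ => 0
  | k + 1, s =>
    let d0 := if consumo_ideal - 1 < 0 then 0 else consumo_ideal - 1
    let g := fun d => calcular_custo (s - d) ideal + bestCost consumo_ideal ideal k (s - d)
    min (min (g d0) (g consumo_ideal)) (g (consumo_ideal + 1))

theorem go_eq_bestCost (fuel : Nat) (dia estoque dias_totais consumo_ideal ideal : Int)
    (hfuel : (dias_totais - dia).toNat = fuel) (hle : dia ≤ dias_totais) :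
    versao_recursiva_go fuel dia estoque dias_totais consumo_ideal ideal =
      bestCost consumo_ideal ideal fuel estoque := by
  induction fuel generalizing dia estoque with
  | zero => simp [versao_recursiva_go, bestCost]
  | succ fuel ih =>
    have h1 : (dias_totais - (dia + 1)).toNat = fuel := by omega
    simp only [versao_recursiva_go, decisoes, List.foldl, if_neg (by omega : ¬ dia = dias_totais)]
    rw [ih (dia + 1) _ h1 (by omega), ih (dia + 1) _ h1 (by omega), ih (dia + 1) _ h1 (by omega)]
    simp only [bestCost, min_def]
    repeat' split
    all_goals simp_all [ite_eq_iff]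
    all_goals omega

theorem altCusto_eq (ideal e : Int) : altCusto ideal e = calcular_custo e ideal := rfl

theorem getD_mk_map_self (l : List Int) (v : Int → Int) (s : Int) (hs : s ∈ l) :
    (PySem.Dict.mk (l.map (fun t => (t, v t)))).getD s 0 = v s := by
  induction l with
  | nil => cases hs
  | cons x t ih =>
    rw [List.map_cons, PySem.Dict.getD, PySem.Dict.get?_mk_cons]
    rcases List.mem_cons.mp hs with h | h
    · simp [h]
    · by_cases hx : x = s
      · simp [hx]
      · rw [PySem.Dict.getD] at ih; simpa [hx] using ih h

-- Proof-side recursive form of Source B's two passes: altSolveRec states k is the dict the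
-- backward loop has produced when the current level is `states` with k days remaining.
def altSolveRec (ideal : Int) (decs : List Int) (states : PySem.Set Int) : Nat → PySem.Dict Int Int
  | 0 => PySem.Dict.mk (states.map (fun s => (s, 0)))
  | k + 1 => altStep ideal decs
      (altSolveRec ideal decs (PySem.Set.ofList (states.flatMap (fun s => decs.map (fun d => s - d)))) k) states

theorem buildLevels_ne_nil (decs : List Int) (lvl : PySem.Set Int) (k : Nat) :
    buildLevels decs lvl k ≠ [] := by
  cases k <;> simp [buildLevels]

theorem fold_eq_altSolveRec (ideal : Int) (decs : List Int) (k : Nat) (lvl : PySem.Set Int) :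
    ((buildLevels decs lvl k).dropLast.reverse).foldl (altStep ideal decs)
        (PySem.Dict.mk ((PySem.List.pyGetD (buildLevels decs lvl k) (-1) []).map (fun s => (s, (0 : Int))))) =
      altSolveRec ideal decs lvl k := by
  induction k generalizing lvl with
  | zero =>
    rw [PySem.List.pyGetD_neg_one (h := buildLevels_ne_nil decs lvl 0)]
    simp [buildLevels, altSolveRec]
  | succ k ih =>
    have hne := buildLevels_ne_nil decs
      (PySem.Set.ofList (lvl.flatMap (fun s => decs.map (fun d => s - d)))) k
    rw [show buildLevels decs lvl (k + 1) = lvl ::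
        buildLevels decs (PySem.Set.ofList (lvl.flatMap (fun s => decs.map (fun d => s - d)))) k from rfl,
      PySem.List.pyGetD_neg_one (h := by simp), List.getLast_cons hne,
      List.dropLast_cons_of_ne_nil hne, List.reverse_cons, List.foldl_concat,
      ← PySem.List.pyGetD_neg_one (h := hne), ih]
    rfl

theorem altSolveRec_getD (consumo_ideal ideal : Int) (k : Nat) (states : List Int) (s : Int) (hs : s ∈ states) :
    (altSolveRec ideal [max (consumo_ideal - 1) 0, consumo_ideal, consumo_ideal + 1] states k).getD s 0 =
      bestCost consumo_ideal ideal k s := by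
  induction k generalizing states s with
  | zero =>
    simp only [altSolveRec]
    rw [getD_mk_map_self states (fun _ => 0) s hs]
    simp [bestCost]
  | succ k ih =>
    simp only [altSolveRec, altStep]
    rw [getD_mk_map_self states _ s hs]
    have hmem : ∀ d : Int, d = max (consumo_ideal - 1) 0 ∨ d = consumo_ideal ∨ d = consumo_ideal + 1 →
        s - d ∈ (PySem.Set.ofList (states.flatMap
          (fun t => [max (consumo_ideal - 1) 0, consumo_ideal, consumo_ideal + 1].map (fun d => t - d))) : List Int) := by
      intro d hd
      rw [PySem.Set.mem_ofList]
      refine List.mem_flatMap.mpr ⟨s, hs, List.mem_map.mpr ⟨d, ?_, rfl⟩⟩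
      rcases hd with h|h|h <;> simp [h]
    rw [List.map_cons, List.map_cons, List.map_cons, List.map_nil,
      PySem.List.min?_id_cons, List.foldl, List.foldl, List.foldl, Option.getD_some]
    rw [ih _ _ (hmem _ (Or.inl rfl)), ih _ _ (hmem _ (Or.inr (Or.inl rfl))),
      ih _ _ (hmem _ (Or.inr (Or.inr rfl)))]
    simp only [bestCost, altCusto_eq]
    have hd0 : max (consumo_ideal - 1) 0 = (if consumo_ideal - 1 < 0 then 0 else consumo_ideal - 1) := by
      rw [max_def]; split_ifs <;> omega
    rw [hd0]

theorem alt_eq_bestCost (dia estoque dias_totais consumo_ideal ideal : Int) :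
    versao_recursiva_alt dia estoque dias_totais consumo_ideal ideal =
      bestCost consumo_ideal ideal (dias_totais - dia).toNat estoque := by
  unfold versao_recursiva_alt
  by_cases h : dias_totais - dia ≤ 0
  · rw [if_pos h]
    have : (dias_totais - dia).toNat = 0 := by omega
    rw [this]; rfl
  · rw [if_neg h]
    simp only
    rw [fold_eq_altSolveRec]
    exact altSolveRec_getD consumo_ideal ideal _ [estoque] estoque (by simp)

-- ===== VERDICT (by name: the statement is the Claim_ definition above) =====
theorem versao_recursiva_spec : Claim_equal_versao_recursiva := by
  intro dia estoque dias_totais consumo_ideal ideal _ hpre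
  unfold Spec_versao_recursiva versao_recursiva
  rw [alt_eq_bestCost, go_eq_bestCost _ _ _ _ _ _ rfl hpre]

@[simp] theorem versao_recursiva_raises : Claim_raises_versao_recursiva := by
  unfold Claim_raises_versao_recursiva
  constructor
  · intro dia estoque dias_totais consumo_ideal ideal _ hr hp
    exact absurd hp (by unfold Pre_versao_recursiva Raises_versao_recursiva at *; omega)
  · exact ⟨by decide, by decide, by decide⟩
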